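-- pv_equiv track=rewrite | github.com/TTN-ATTN/healthcare_abe_app | src/storage_server/auth.py | get_expanded_attributes
-- ===== SOURCE A (Python) =====
-- def get_expanded_attributes(user_attributes):
--     """
--     Expand specialized roles to include their parent roles
--     This creates a hierarchical permission system
--     """
--     expanded = set(user_attributes.copy())
--
--     # Define role hierarchies - specialized roles inherit from general roles
--     role_hierarchy = {
--         'neurology_doctor': ['doctor'],
--         'cardiology_doctor': ['doctor'],
--         'pediatric_doctor': ['doctor'],
--         'surgery_doctor': ['doctor'],
--         'oncology_doctor': ['doctor'],
--
--         'head_nurse': ['nurse', 'administrator'],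
--         'surgical_nurse': ['nurse'],
--         'pediatric_nurse': ['nurse'],
--
--         'senior_pharmacist': ['pharmacist'],
--         'clinical_pharmacist': ['pharmacist'],
--
--         'lead_researcher': ['researcher', 'administrator'],
--         'clinical_researcher': ['researcher'],
--
--         'senior_accountant': ['accountant'],
--         'financial_manager': ['accountant', 'administrator'],
--
--         'system_admin': ['administrator'],
--         'medical_admin': ['administrator'],
--
--         # Add more specialized roles as needed
--     }
--
--     # Expand attributes based on hierarchy
--     for attr in user_attributes:
--         if attr in role_hierarchy:
--             expanded.update(role_hierarchy[attr])
--
--     return list(expanded)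
-- ===== SOURCE B (Python) =====
-- _DOCTOR_SPECIALTIES = ('neurology_doctor', 'cardiology_doctor', 'pediatric_doctor',
--                        'surgery_doctor', 'oncology_doctor')
--
--
-- def _parents(role):
--     """Direct parents of a role (empty for general roles)."""
--     if role in _DOCTOR_SPECIALTIES:
--         return ['doctor']
--     if role == 'head_nurse':
--         return ['nurse', 'administrator']
--     if role in ('surgical_nurse', 'pediatric_nurse'):
--         return ['nurse']
--     if role in ('senior_pharmacist', 'clinical_pharmacist'):
--         return ['pharmacist']
--     if role == 'lead_researcher':
--         return ['researcher', 'administrator']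
--     if role == 'clinical_researcher':
--         return ['researcher']
--     if role == 'senior_accountant':
--         return ['accountant']
--     if role == 'financial_manager':
--         return ['accountant', 'administrator']
--     if role in ('system_admin', 'medical_admin'):
--         return ['administrator']
--     return []
--
--
-- def get_expanded_attributes(user_attributes):
--     """Transitive-closure expansion of roles via a FIFO worklist."""
--     expanded = set(user_attributes.copy())
--     queue = list(user_attributes)
--     i = 0
--     while i < len(queue):
--         role = queue[i]
--         i += 1
--         for parent in _parents(role):
--             if parent not in expanded:
--                 expanded.add(parent)
--                 queue.append(parent)
--     return list(expanded)
-- ===== Notes on version B (the rewrite author's own statement) =====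
-- stated objective: alternative
-- what changed: B replaces A's dict literal plus one flat pass over user_attributes by a predicate-style _parents function (membership tests, no dict) driving a FIFO-worklist transitive-closure expansion: roles are dequeued, unseen parents are added to the set and enqueued, until the worklist empties.
import Mathlib
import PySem

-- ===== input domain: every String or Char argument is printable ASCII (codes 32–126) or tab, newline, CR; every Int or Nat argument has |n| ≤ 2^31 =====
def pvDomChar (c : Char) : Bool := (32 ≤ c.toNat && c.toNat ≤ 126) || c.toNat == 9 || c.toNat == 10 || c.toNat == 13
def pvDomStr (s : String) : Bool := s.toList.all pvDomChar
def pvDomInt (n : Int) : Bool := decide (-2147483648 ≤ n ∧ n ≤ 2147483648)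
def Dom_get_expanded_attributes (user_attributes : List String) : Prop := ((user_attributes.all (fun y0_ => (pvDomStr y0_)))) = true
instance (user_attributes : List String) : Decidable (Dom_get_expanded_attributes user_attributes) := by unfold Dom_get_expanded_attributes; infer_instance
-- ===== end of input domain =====

-- B replaces A's dict-driven flat pass by a predicate-style parents function (no dict)
-- driving a FIFO-worklist transitive closure (alternative algorithm; same cost).
-- Return value equivalence only; neither version mutates its argument.

-- ===== PORT A =====
-- the role_hierarchy dict A builds inside the function
def roleHierarchy : PySem.Dict String (List String) := PySem.Dict.ofList [
  ("neurology_doctor", ["doctor"]),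
  ("cardiology_doctor", ["doctor"]),
  ("pediatric_doctor", ["doctor"]),
  ("surgery_doctor", ["doctor"]),
  ("oncology_doctor", ["doctor"]),
  ("head_nurse", ["nurse", "administrator"]),
  ("surgical_nurse", ["nurse"]),
  ("pediatric_nurse", ["nurse"]),
  ("senior_pharmacist", ["pharmacist"]),
  ("clinical_pharmacist", ["pharmacist"]),
  ("lead_researcher", ["researcher", "administrator"]),
  ("clinical_researcher", ["researcher"]),
  ("senior_accountant", ["accountant"]),
  ("financial_manager", ["accountant", "administrator"]),
  ("system_admin", ["administrator"]),
  ("medical_admin", ["administrator"])]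

def get_expanded_attributes (user_attributes : List String) : List String :=
  -- expanded = set(user_attributes.copy())
  let expanded : PySem.Set String := PySem.Set.ofList user_attributes
  -- for attr in user_attributes: if attr in role_hierarchy: expanded.update(role_hierarchy[attr])
  user_attributes.foldl
    (fun e attr =>
      if roleHierarchy.contains attr then PySem.Set.update e (roleHierarchy.getD attr []) else e)
    expanded
  -- return list(expanded)

-- ===== PORT B =====
-- _parents(role): membership-test chain, mirrors Source B's if/elif cascade
def pvParents (role : String) : List String :=
  if role ∈ ["neurology_doctor", "cardiology_doctor", "pediatric_doctor",
             "surgery_doctor", "oncology_doctor"] then ["doctor"]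
  else if role = "head_nurse" then ["nurse", "administrator"]
  else if role ∈ ["surgical_nurse", "pediatric_nurse"] then ["nurse"]
  else if role ∈ ["senior_pharmacist", "clinical_pharmacist"] then ["pharmacist"]
  else if role = "lead_researcher" then ["researcher", "administrator"]
  else if role = "clinical_researcher" then ["researcher"]
  else if role = "senior_accountant" then ["accountant"]
  else if role = "financial_manager" then ["accountant", "administrator"]
  else if role ∈ ["system_admin", "medical_admin"] then ["administrator"]
  else []

-- inner 'for parent in _parents(role):' loop of Source B on the state (expanded, queue tail)
def pvAddParents : List String → PySem.Set String → List String → PySem.Set String × List String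
  | [], seen, pending => (seen, pending)
  | p :: ps, seen, pending =>
      if PySem.Set.contains seen p then pvAddParents ps seen pending
      else pvAddParents ps (PySem.Set.add seen p) (pending ++ [p])

-- weight of a queue entry / of the whole queue: the worklist measure
def pvW (r : String) : Nat := 1 + (pvParents r).length
def pvMu (q : List String) : Nat := (q.map pvW).sum

-- facts the worklist's termination needs (cited in decreasing_by); stated here so pvDrain can use them
theorem pvAdd_spec (ps : List String) (e : PySem.Set String) (q : List String) :
    (pvAddParents ps e q).1 = PySem.Set.update e ps ∧
    ∃ t, (pvAddParents ps e q).2 = q ++ t ∧ t.length ≤ ps.length ∧ ∀ x ∈ t, x ∈ ps := by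
  induction ps generalizing e q with
  | nil => exact ⟨by simp [pvAddParents, PySem.Set.update_nil], [], by simp [pvAddParents]⟩
  | cons p ps ih =>
    by_cases h : PySem.Set.contains e p
    · have he : PySem.Set.add e p = e :=
        PySem.Set.add_of_mem ((PySem.Set.contains_iff e p).mp h)
      obtain ⟨h1, t, h2, hlen, hmem⟩ := ih e q
      refine ⟨?_, t, ?_, by simpa using Nat.le_succ_of_le hlen,
        fun x hx => List.mem_cons_of_mem _ (hmem x hx)⟩
      · rw [pvAddParents, if_pos h, h1, PySem.Set.update_cons, he]
      · rw [pvAddParents, if_pos h]; exact h2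
    · obtain ⟨h1, t, h2, hlen, hmem⟩ := ih (PySem.Set.add e p) (q ++ [p])
      refine ⟨?_, p :: t, ?_, by simpa using hlen, ?_⟩
      · rw [pvAddParents, if_neg h, h1, PySem.Set.update_cons]
      · rw [pvAddParents, if_neg h, h2, List.append_assoc]; rfl
      · intro x hx
        rcases List.mem_cons.mp hx with rfl | hx
        · exact List.mem_cons_self
        · exact List.mem_cons_of_mem _ (hmem x hx)

-- every parent a role can have is itself parentless (the hierarchy is one level deep)
theorem pvParents_leaf {r p : String} (hp : p ∈ pvParents r) : pvParents p = [] := by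
  unfold pvParents at hp
  split_ifs at hp <;> simp at hp <;> rcases hp with rfl | rfl <;> decide

theorem pvMu_lt (r : String) (q : List String) (t : List String)
    (hlen : t.length ≤ (pvParents r).length)
    (hmem : ∀ x ∈ t, x ∈ pvParents r) :
    pvMu (q ++ t) < pvMu (r :: q) := by
  have ht : pvMu t = t.length := by
    have : t.map pvW = t.map (fun _ => 1) := by
      apply List.map_congr_left
      intro x hx
      simp [pvW, pvParents_leaf (hmem x hx)]
    simp [pvMu, this]
  have h1 : pvMu (q ++ t) = pvMu q + pvMu t := by simp [pvMu]
  have h2 : pvMu (r :: q) = pvW r + pvMu q := by simp [pvMu]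
  have h3 : pvW r = 1 + (pvParents r).length := rfl
  omega

-- the 'while i < len(queue):' FIFO drain of Source B (queue[i:] is the unprocessed suffix)
def pvDrain : List String → PySem.Set String → PySem.Set String
  | [], seen => seen
  | role :: rest, seen =>
      let st := pvAddParents (pvParents role) seen rest
      pvDrain st.2 st.1
termination_by q _ => pvMu q
decreasing_by
  obtain ⟨-, t, h2, hlen, hmem⟩ := pvAdd_spec (pvParents role) seen rest
  simpa [st, h2] using pvMu_lt role rest t hlen hmem

def get_expanded_attributes_alt (user_attributes : List String) : List String :=
  -- expanded = set(user_attributes.copy()); queue = list(user_attributes); i = 0; while …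
  pvDrain user_attributes (PySem.Set.ofList user_attributes)
  -- return list(expanded)

-- ===== PRECONDITION & SPEC =====
def Spec_get_expanded_attributes (user_attributes : List String) (out : List String) : Prop := out = get_expanded_attributes_alt user_attributes
instance (user_attributes : List String) (out : List String) : Decidable (Spec_get_expanded_attributes user_attributes out) := by unfold Spec_get_expanded_attributes; infer_instance

-- ===== CLAIM (what is proved, stated in full; the proofs are below) =====
def Claim_equal_get_expanded_attributes : Prop := ∀ (user_attributes : List String), Dom_get_expanded_attributes user_attributes → Spec_get_expanded_attributes user_attributes (get_expanded_attributes user_attributes)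

-- ===== LEMMAS AND PROOFS =====

-- one step of A's loop, named for the equivalence proof
def pvStepA (e : PySem.Set String) (attr : String) : PySem.Set String :=
  if roleHierarchy.contains attr then PySem.Set.update e (roleHierarchy.getD attr []) else e

-- A's dict lookup with default [] and B's membership cascade agree on every string
theorem pvParents_agree (r : String) : roleHierarchy.getD r [] = pvParents r := by
  by_cases hc : roleHierarchy.contains r
  · have hk : r ∈ roleHierarchy.keys := by
      simpa using (PySem.Dict.contains_iff_mem_keys roleHierarchy r).mp hc
    have hkeys : roleHierarchy.keys = ["neurology_doctor", "cardiology_doctor",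
      "pediatric_doctor", "surgery_doctor", "oncology_doctor", "head_nurse",
      "surgical_nurse", "pediatric_nurse", "senior_pharmacist", "clinical_pharmacist",
      "lead_researcher", "clinical_researcher", "senior_accountant", "financial_manager",
      "system_admin", "medical_admin"] := by decide
    rw [hkeys] at hk
    simp only [List.mem_cons, List.not_mem_nil, or_false] at hk
    rcases hk with rfl | rfl | rfl | rfl | rfl | rfl | rfl | rfl | rfl | rfl | rfl | rfl | rfl | rfl | rfl | rfl <;> decide
  · have hd : roleHierarchy.getD r [] = [] :=
      PySem.Dict.getD_of_not_contains roleHierarchy ([]) (by simpa using hc)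
    have hp : pvParents r = [] := by
      unfold pvParents
      split_ifs with h1 h2 h3 h4 h5 h6 h7 h8 h9
      all_goals first
        | rfl
        | (exfalso; apply hc
           first
             | (simp only [List.mem_cons, List.not_mem_nil, or_false] at h1
                rcases h1 with rfl | rfl | rfl | rfl | rfl <;> decide)
             | (simp only [List.mem_cons, List.not_mem_nil, or_false] at h3
                rcases h3 with rfl | rfl <;> decide)
             | (simp only [List.mem_cons, List.not_mem_nil, or_false] at h4
                rcases h4 with rfl | rfl <;> decide)
             | (simp only [List.mem_cons, List.not_mem_nil, or_false] at h9
                rcases h9 with rfl | rfl <;> decide)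
             | (subst h2; decide)
             | (subst h5; decide)
             | (subst h6; decide)
             | (subst h7; decide)
             | (subst h8; decide))
    rw [hd, hp]

theorem pvStepA_eq_update (e : PySem.Set String) (attr : String) :
    pvStepA e attr = PySem.Set.update e (pvParents attr) := by
  unfold pvStepA
  by_cases h : roleHierarchy.contains attr
  · simp [h, pvParents_agree]
  · have hd : pvParents attr = [] := by
      rw [← pvParents_agree]
      exact PySem.Dict.getD_of_not_contains roleHierarchy ([]) (by simpa using h)
    simp [h, hd, PySem.Set.update_nil]

-- the worklist does nothing on a queue of leaves
theorem pvDrain_leaves (q : List String) (e : PySem.Set String)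
    (h : ∀ x ∈ q, pvParents x = []) : pvDrain q e = e := by
  induction q with
  | nil => rw [pvDrain]
  | cons r q ih =>
    rw [pvDrain]
    have hr : pvParents r = [] := h r List.mem_cons_self
    simp only [hr, pvAddParents]
    exact ih (fun x hx => h x (List.mem_cons_of_mem _ hx))

-- the worklist on (real queue ++ pending leaves) equals A's flat fold over the real queue
theorem pvDrain_eq_foldl (q : List String) (t : List String) (e : PySem.Set String)
    (ht : ∀ x ∈ t, pvParents x = []) :
    pvDrain (q ++ t) e = q.foldl pvStepA e := by
  induction q generalizing t e with
  | nil => simpa using pvDrain_leaves t e ht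
  | cons r q ih =>
    rw [List.cons_append, pvDrain]
    obtain ⟨h1, tn, h2, -, hmem⟩ := pvAdd_spec (pvParents r) e (q ++ t)
    simp only [h1, h2, List.append_assoc]
    rw [ih (t ++ tn) (PySem.Set.update e (pvParents r))
        (fun x hx => (List.mem_append.mp hx).elim (ht x) (fun h => pvParents_leaf (hmem x h)))]
    rw [List.foldl_cons, pvStepA_eq_update]

-- ===== VERDICT (by name: the statement is the Claim_ definition above) =====
theorem get_expanded_attributes_spec : Claim_equal_get_expanded_attributes := by
  intro ua _
  unfold Spec_get_expanded_attributes
  have hb : get_expanded_attributes_alt ua = ua.foldl pvStepA (PySem.Set.ofList ua) := by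
    unfold get_expanded_attributes_alt
    simpa using pvDrain_eq_foldl ua [] (PySem.Set.ofList ua) (by simp)
  rw [hb]
  rfl
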